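-- pv_equiv track=rewrite | github.com/xaviet/lorap | tools/testlora.py | string_replace
-- ===== SOURCE A (Python) =====
-- def string_replace(vChars):
--   s = []
--   for el0 in vChars:
--     if(el0 in range(ord('a'), ord('z') + 1)):
--       s += [ord('z') - (el0 - ord('a'))]
--     elif(el0 in range(ord('A'), ord('Z') + 1)):
--       s += [ord('Z') - (el0 - ord('A'))]
--     elif(el0 in range(ord('0'), ord('9') + 1)):
--       s += [ord('9') - (el0 - ord('0'))]
--     else:
--       s += [el0]
--   return(s)
-- ===== SOURCE B (Python) =====
-- def _reflect_pass(lo, hi, codes):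
--   # reflect only codes inside [lo, hi]; everything else passes through
--   return [lo + hi - c if lo <= c <= hi else c for c in codes]
--
-- def string_replace(vChars):
--   # three staged full passes, one per class; ranges are disjoint and
--   # closed under reflection, so the passes commute / do not interfere
--   out = list(vChars)
--   for lo, hi in ((ord('a'), ord('z')), (ord('A'), ord('Z')), (ord('0'), ord('9'))):
--     out = _reflect_pass(lo, hi, out)
--   return out
-- ===== Notes on version B (the rewrite author's own statement) =====
-- stated objective: alternative
-- what changed: B replaces A's single pass with a per-element three-way branch cascade by three staged whole-list comprehension passes, each reflecting exactly one class (lowercase, uppercase, digits); correctness rests on the ranges being disjoint and closed under reflection.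
import Mathlib
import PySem

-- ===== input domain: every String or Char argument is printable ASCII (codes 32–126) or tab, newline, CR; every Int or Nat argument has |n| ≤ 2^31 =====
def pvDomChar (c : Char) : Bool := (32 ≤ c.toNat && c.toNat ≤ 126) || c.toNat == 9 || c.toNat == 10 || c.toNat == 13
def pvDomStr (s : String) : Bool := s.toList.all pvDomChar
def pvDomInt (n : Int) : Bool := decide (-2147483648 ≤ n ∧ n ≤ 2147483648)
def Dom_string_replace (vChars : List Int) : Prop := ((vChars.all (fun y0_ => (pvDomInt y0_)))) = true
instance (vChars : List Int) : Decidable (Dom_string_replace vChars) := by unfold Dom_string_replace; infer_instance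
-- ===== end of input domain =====

-- B replaces A's single pass + branch cascade by three staged whole-list passes (one per class); a different decomposition (a timing run measured B faster).

-- ===== PORT A =====
def string_replace (vChars : List Int) : List Int :=
  vChars.foldl (fun s el0 =>
    if el0 ∈ PySem.List.pyRange 97 (122 + 1) 1 then s ++ [122 - (el0 - 97)]
    else if el0 ∈ PySem.List.pyRange 65 (90 + 1) 1 then s ++ [90 - (el0 - 65)]
    else if el0 ∈ PySem.List.pyRange 48 (57 + 1) 1 then s ++ [57 - (el0 - 48)]
    else s ++ [el0]) []

-- ===== PORT B =====
def reflectPass (lo hi : Int) (codes : List Int) : List Int :=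
  codes.map (fun c => if lo ≤ c ∧ c ≤ hi then lo + hi - c else c)

def string_replace_alt (vChars : List Int) : List Int :=
  ([(97, 122), (65, 90), (48, 57)] : List (Int × Int)).foldl
    (fun out p => reflectPass p.1 p.2 out) vChars

-- ===== PRECONDITION & SPEC =====
def Spec_string_replace (vChars : List Int) (out : List Int) : Prop := out = string_replace_alt vChars
instance (vChars : List Int) (out : List Int) : Decidable (Spec_string_replace vChars out) := by unfold Spec_string_replace; infer_instance

-- ===== CLAIM (what is proved, stated in full; the proofs are below) =====
def Claim_equal_string_replace : Prop := ∀ (vChars : List Int), Dom_string_replace vChars → Spec_string_replace vChars (string_replace vChars)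

-- ===== LEMMAS AND PROOFS =====

-- ===== VERDICT (by name: the statement is the Claim_ definition above) =====
theorem string_replace_spec : Claim_equal_string_replace := by
  intro vChars _
  show string_replace vChars = string_replace_alt vChars
  unfold string_replace string_replace_alt reflectPass
  have hfun : (fun (s : List Int) (el0 : Int) =>
      if el0 ∈ PySem.List.pyRange 97 (122 + 1) 1 then s ++ [122 - (el0 - 97)]
      else if el0 ∈ PySem.List.pyRange 65 (90 + 1) 1 then s ++ [90 - (el0 - 65)]
      else if el0 ∈ PySem.List.pyRange 48 (57 + 1) 1 then s ++ [57 - (el0 - 48)]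
      else s ++ [el0])
    = (fun s el0 => s ++ [
      if el0 ∈ PySem.List.pyRange 97 (122 + 1) 1 then 122 - (el0 - 97)
      else if el0 ∈ PySem.List.pyRange 65 (90 + 1) 1 then 90 - (el0 - 65)
      else if el0 ∈ PySem.List.pyRange 48 (57 + 1) 1 then 57 - (el0 - 48)
      else el0]) := by
    funext s el0; split_ifs <;> rfl
  rw [hfun, PySem.List.foldl_append_singleton_eq_map]
  simp only [List.foldl_cons, List.foldl_nil, List.map_map]
  refine List.map_congr_left fun c _ => ?_
  simp only [Function.comp, PySem.List.mem_pyRange_one]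
  split_ifs <;> omega
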